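-- pv_equiv track=rewrite | github.com/TimeB1729/codeforces | pB.py | solve
-- ===== SOURCE A (Python) =====
-- def solve(t, test_cases):
--     results=[]
--     for i in range(t):
--         n,k,rmp=test_cases[i]
--         r0 = []
--         count_0=0
--         for j in range(n):
--             if rmp[j]==0:
--                 count_0+=1
--             else:
--                 r0.append(count_0)
--                 count_0=0
--         r0.append(count_0)
--         res=0
--         for x in r0:
--             if x>=k:
--                 res+=1+(x-k)//(k+1)
--
--         results.append(res)
--     return results
-- ===== SOURCE B (Python) =====
-- def solve(t, test_cases):
--     results = []
--     for i in range(t):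
--         n, k, rmp = test_cases[i]
--         cells = range(n)
--         bounds = [-1] + [j for j in cells if rmp[j] != 0] + [len(cells)]
--         res = 0
--         for b1, b2 in zip(bounds, bounds[1:]):
--             res += (b2 - b1) // (k + 1)
--         results.append(res)
--     return results
-- ===== Notes on version B (the rewrite author's own statement) =====
-- stated objective: alternative
-- what changed: Instead of scanning each array while accumulating zero-run lengths into a list r0 and summing the guarded formula 1+(x-k)//(k+1) per run, B collects the indices of the nonzero separators, brackets them with the sentinels -1 and the scanned length, and sums the closed form (b2-b1)//(k+1) over consecutive boundary pairs.
import Mathlib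
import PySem

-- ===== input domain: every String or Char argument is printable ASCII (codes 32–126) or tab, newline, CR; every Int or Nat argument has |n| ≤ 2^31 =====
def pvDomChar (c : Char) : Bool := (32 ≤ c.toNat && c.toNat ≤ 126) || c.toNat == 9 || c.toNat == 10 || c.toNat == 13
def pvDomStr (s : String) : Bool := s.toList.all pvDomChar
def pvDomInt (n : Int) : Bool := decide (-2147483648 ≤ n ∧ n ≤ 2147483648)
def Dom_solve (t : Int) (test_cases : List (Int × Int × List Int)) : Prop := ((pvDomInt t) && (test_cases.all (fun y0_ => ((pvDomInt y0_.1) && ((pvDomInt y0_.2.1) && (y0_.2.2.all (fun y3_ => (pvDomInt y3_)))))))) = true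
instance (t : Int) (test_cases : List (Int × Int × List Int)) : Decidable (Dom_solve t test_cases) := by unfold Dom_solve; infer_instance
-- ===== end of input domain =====

-- B replaces A's zero-run accumulation + guarded per-run formula by nonzero-separator boundaries
-- with sentinels and the closed form (b2-b1)//(k+1); objective: alternative (same cost).

-- ===== PORT A =====
-- per-test-case body of A: build the list r0 of zero-run lengths, then sum 1+(x-k)//(k+1) over runs x ≥ k
def caseA (c : Int × Int × List Int) : Int :=
  let s := (PySem.List.pyRange 0 c.1 1).foldl
    (fun (st : List Int × Int) j =>
      if PySem.List.pyGetD c.2.2 j 0 = 0 then (st.1, st.2 + 1) else (st.1 ++ [st.2], 0))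
    ([], 0)
  let r0 := s.1 ++ [s.2]
  r0.foldl (fun res x =>
    if c.2.1 ≤ x then res + (1 + PySem.Int.floordiv (x - c.2.1) (c.2.1 + 1)) else res) 0

def solve (t : Int) (test_cases : List (Int × Int × List Int)) : List Int :=
  (PySem.List.pyRange 0 t 1).foldl
    (fun results i => results ++ [caseA (PySem.List.pyGetD test_cases i (0, 0, []))]) []

-- ===== PORT B =====
-- per-test-case body of B: nonzero indices of the scanned cells range(n), bracketed by the
-- sentinels -1 and len(cells); sum gaps // (k+1)
def caseB (c : Int × Int × List Int) : Int :=
  let cells := PySem.List.pyRange 0 c.1 1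
  let bounds := [(-1 : Int)] ++
    cells.filter (fun j => PySem.List.pyGetD c.2.2 j 0 != 0) ++ [(cells.length : Int)]
  (bounds.zip bounds.tail).foldl
    (fun res p => res + PySem.Int.floordiv (p.2 - p.1) (c.2.1 + 1)) 0

def solve_alt (t : Int) (test_cases : List (Int × Int × List Int)) : List Int :=
  (PySem.List.pyRange 0 t 1).foldl
    (fun results i => results ++ [caseB (PySem.List.pyGetD test_cases i (0, 0, []))]) []

-- ===== PRECONDITION & SPEC =====
-- Pre_ excludes exactly the inputs where A raises: t > len(test_cases) (IndexError),
-- a used test case with n > len(rmp) (IndexError), or a used test case with k = -1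
-- (ZeroDivisionError in (x-k)//(k+1), always reached since r0 is never empty).
def Pre_solve (t : Int) (test_cases : List (Int × Int × List Int)) : Prop :=
  t ≤ (test_cases.length : Int) ∧
  ∀ c ∈ test_cases.take t.toNat,
    c.1 ≤ (c.2.2.length : Int) ∧ c.2.1 ≠ -1
instance (t : Int) (test_cases : List (Int × Int × List Int)) : Decidable (Pre_solve t test_cases) := by
  unfold Pre_solve; infer_instance

def pvWitness_solve : Int × (List (Int × Int × List Int)) := (1, [(3, 1, [0, 1, 0])])

def Spec_solve (t : Int) (test_cases : List (Int × Int × List Int)) (out : List Int) : Prop :=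
  out = solve_alt t test_cases
instance (t : Int) (test_cases : List (Int × Int × List Int)) (out : List Int) : Decidable (Spec_solve t test_cases out) := by
  unfold Spec_solve; infer_instance

-- ===== CLAIM (what is proved, stated in full; the proofs are below) =====
def Claim_equal_solve : Prop := ∀ (t : Int) (test_cases : List (Int × Int × List Int)),
  Dom_solve t test_cases → Pre_solve t test_cases → Spec_solve t test_cases (solve t test_cases)

-- ===== LEMMAS AND PROOFS =====

-- zero-run lengths of a list (A's r0)
def runsAux (c : Int) : List Int → List Int
  | [] => [c]
  | x :: xs => if x = 0 then runsAux (c + 1) xs else c :: runsAux 0 xs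

-- indices of the nonzero elements, counting from i (B's boundary core)
def nzPos (i : Int) : List Int → List Int
  | [] => []
  | x :: xs => if x = 0 then nzPos (i + 1) xs else i :: nzPos (i + 1) xs

-- sum of floordiv'd consecutive gaps of a boundary list
def gapsum (d : Int) : List Int → Int
  | b0 :: b1 :: rest => PySem.Int.floordiv (b1 - b0) d + gapsum d (b1 :: rest)
  | _ => 0

-- an index loop over a prefix is a fold over the taken prefix (empty when t < 0)
lemma foldl_pyRange_take {α β : Type} (xs : List α) (d : α) (f : β → α → β) (init : β)
    (t : Int) (h1 : t ≤ (xs.length : Int)) :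
    (PySem.List.pyRange 0 t 1).foldl (fun acc j => f acc (PySem.List.pyGetD xs j d)) init
      = (xs.take t.toNat).foldl f init := by
  by_cases h0 : 0 ≤ t
  · have hlen3 : ((xs.take t.toNat).length : Int) = t := by
      simp [List.length_take]; omega
    have hcongr : (PySem.List.pyRange 0 t 1).foldl
        (fun acc j => f acc (PySem.List.pyGetD xs j d)) init
        = (PySem.List.pyRange 0 t 1).foldl
        (fun acc j => f acc (PySem.List.pyGetD (xs.take t.toNat) j d)) init := by
      apply PySem.List.foldl_congr_mem
      intro acc j hj
      obtain ⟨hj0, hjt⟩ := PySem.List.mem_pyRange_one.mp hj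
      have hjlt : j < (xs.length : Int) := lt_of_lt_of_le hjt h1
      rw [PySem.List.pyGetD_eq_getElem xs d hj0 hjlt,
          PySem.List.pyGetD_eq_getElem (xs.take t.toNat) d hj0 (by omega)]
      rw [List.getElem_take]
    rw [hcongr]
    have key := PySem.List.foldl_pyRange_zero_pyGetD (xs.take t.toNat) d f init
    have hlen2 : PySem.List.len (xs.take t.toNat) = t := by
      simp [PySem.List.len_eq, List.length_take]; omega
    rw [hlen2] at key
    exact key
  · rw [PySem.List.pyRange_one_eq_nil (by omega), show t.toNat = 0 by omega]
    simp

-- A's run-collecting loop computes runsAux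
lemma foldA (l : List Int) : ∀ (acc : List Int) (c : Int),
    (l.foldl (fun (st : List Int × Int) x =>
        if x = 0 then (st.1, st.2 + 1) else (st.1 ++ [st.2], 0)) (acc, c)).1
      ++ [(l.foldl (fun (st : List Int × Int) x =>
        if x = 0 then (st.1, st.2 + 1) else (st.1 ++ [st.2], 0)) (acc, c)).2]
      = acc ++ runsAux c l := by
  induction l with
  | nil => intro acc c; simp [runsAux]
  | cons x xs ih =>
    intro acc c
    simp only [List.foldl_cons]
    by_cases hx : x = 0
    · rw [if_pos hx, show runsAux c (x :: xs) = runsAux (c + 1) xs from by simp [runsAux, hx]]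
      exact ih acc (c + 1)
    · rw [if_neg hx, show runsAux c (x :: xs) = c :: runsAux 0 xs from by simp [runsAux, hx],
          show acc ++ c :: runsAux 0 xs = (acc ++ [c]) ++ runsAux 0 xs from by simp]
      exact ih (acc ++ [c]) 0

lemma runsAux_nonneg (l : List Int) : ∀ (c : Int), 0 ≤ c → ∀ x ∈ runsAux c l, 0 ≤ x := by
  induction l with
  | nil => intro c hc x hx; simp [runsAux] at hx; omega
  | cons y ys ih =>
    intro c hc x hx
    by_cases hy : y = 0
    · simp only [runsAux, if_pos hy] at hx; exact ih (c + 1) (by omega) x hx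
    · simp only [runsAux, if_neg hy, List.mem_cons] at hx
      rcases hx with h | h
      · omega
      · exact ih 0 (by omega) x h

-- the guarded per-run formula equals the closed form (x+1)//(k+1)
lemma floordiv_add_self (a b : Int) (h : b ≠ 0) :
    PySem.Int.floordiv (a + b) b = 1 + PySem.Int.floordiv a b := by
  unfold PySem.Int.floordiv
  rw [show a + b = a + 1 * b by ring, Int.add_mul_fdiv_right _ _ h]; ring

lemma arith (x k : Int) (hx : 0 ≤ x) (hk : k ≠ -1) :
    (if k ≤ x then 1 + PySem.Int.floordiv (x - k) (k + 1) else 0)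
      = PySem.Int.floordiv (x + 1) (k + 1) := by
  by_cases h : k ≤ x
  · rw [if_pos h, show x + 1 = (x - k) + (k + 1) by ring,
        floordiv_add_self _ _ (by omega)]
  · rw [if_neg h]
    symm
    rw [PySem.Int.floordiv_eq_iff_of_pos (by omega)]
    omega

-- filter over range(n) of a nonzero test is nzPos of the prefix
lemma filt (g : Int → Int) : ∀ (l : List Int) (i : Int),
    (∀ (m : Nat) (hm : m < l.length), g (i + m) = l[m]) →
    (PySem.List.pyRange i (i + (l.length : Int)) 1).filter (fun j => g j != 0) = nzPos i l := by
  intro l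
  induction l with
  | nil => intro i _; rw [PySem.List.pyRange_one_eq_nil (by simp)]; rfl
  | cons x xs ih =>
    intro i h
    have hx : g i = x := by have := h 0 (by simp); simpa using this
    have hlt : i < i + ((x :: xs).length : Int) := by simp
    have hend : i + ((x :: xs).length : Int) = (i + 1) + (xs.length : Int) := by
      simp; ring
    rw [PySem.List.pyRange_one_cons hlt, hend, List.filter_cons]
    have hrec := ih (i + 1) (by
      intro m hm
      have h2 := h (m + 1) (by simpa using Nat.succ_lt_succ hm)
      rw [show (i + 1) + (m : Int) = i + ((m + 1 : Nat) : Int) by omega, h2]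
      simp)
    by_cases hx0 : x = 0
    · simp [hx, hx0, hrec, nzPos]
    · simp [hx, hx0, hrec, nzPos]

-- the consecutive-pairs fold is gapsum
lemma zipfold (d : Int) (bs : List Int) : ∀ (acc : Int),
    (bs.zip bs.tail).foldl (fun res p => res + PySem.Int.floordiv (p.2 - p.1) d) acc
      = acc + gapsum d bs := by
  induction bs with
  | nil => intro acc; simp [gapsum]
  | cons b0 rest ih =>
    intro acc
    cases rest with
    | nil => simp [gapsum]
    | cons b1 r =>
      simp only [List.tail_cons, List.zip_cons_cons, List.foldl_cons]
      simp only [List.tail_cons] at ih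
      rw [ih (acc + PySem.Int.floordiv (b1 - b0) d)]
      simp [gapsum]; ring

-- core correspondence: gaps of sentinel-bracketed nonzero positions = runs shifted by one
lemma gaps_eq_runs (d : Int) : ∀ (l : List Int) (prev i : Int),
    gapsum d (prev :: (nzPos i l ++ [i + (l.length : Int)]))
      = ((runsAux (i - prev - 1) l).map (fun x => PySem.Int.floordiv (x + 1) d)).sum := by
  intro l
  induction l with
  | nil =>
    intro prev i
    simp [nzPos, runsAux, gapsum]
  | cons x xs ih =>
    intro prev i
    by_cases hx : x = 0
    · simp only [nzPos, runsAux, hx]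
      have hend : i + ((List.length (0 :: xs) : Nat) : Int) = (i + 1) + (xs.length : Int) := by
        simp; ring
      rw [hend]
      have := ih prev (i + 1)
      rw [show (i + 1) - prev - 1 = i - prev - 1 + 1 by ring] at this
      exact this
    · simp only [nzPos, runsAux, if_neg hx]
      have hend : i + ((List.length (x :: xs) : Nat) : Int) = (i + 1) + (xs.length : Int) := by
        simp; ring
      rw [List.cons_append, hend]
      show PySem.Int.floordiv (i - prev) d + gapsum d (i :: (nzPos (i + 1) xs ++ [(i + 1) + (xs.length : Int)])) = _
      rw [ih i (i + 1)]
      simp only [List.map_cons, List.sum_cons]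
      rw [show i + 1 - i - 1 = 0 by ring, show i - prev - 1 + 1 = i - prev by ring]

-- the per-test-case computations agree
lemma caseA_eq_caseB (c : Int × Int × List Int)
    (h1 : c.1 ≤ (c.2.2.length : Int)) (hk : c.2.1 ≠ -1) :
    caseA c = caseB c := by
  obtain ⟨n, k, rmp⟩ := c
  simp only at h1 hk
  unfold caseA caseB
  simp only
  set l := rmp.take n.toNat with hl
  have hlen : (l.length : Int) = (n.toNat : Int) := by
    simp [hl, List.length_take]; omega
  -- A side
  rw [foldl_pyRange_take rmp 0
      (fun (st : List Int × Int) x => if x = 0 then (st.1, st.2 + 1) else (st.1 ++ [st.2], 0))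
      ([], 0) n h1]
  rw [foldA l [] 0, List.nil_append]
  rw [PySem.List.foldl_congr_mem (runsAux 0 l)
      (fun res x => if k ≤ x then res + (1 + PySem.Int.floordiv (x - k) (k + 1)) else res)
      (fun res x => res + (if k ≤ x then 1 + PySem.Int.floordiv (x - k) (k + 1) else 0)) 0
      (by intro acc x _; by_cases hkx : k ≤ x <;> simp [hkx])]
  rw [PySem.List.foldl_add]
  rw [List.map_congr_left (fun x hx => arith x k (runsAux_nonneg l 0 le_rfl x hx) hk)]
  -- B side
  have hr : PySem.List.pyRange 0 n 1 = PySem.List.pyRange 0 (0 + (l.length : Int)) 1 := by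
    by_cases h0 : 0 ≤ n
    · rw [show n = 0 + (l.length : Int) by omega]
    · rw [PySem.List.pyRange_one_eq_nil (by omega),
          PySem.List.pyRange_one_eq_nil (by omega)]
  have hfilt : (PySem.List.pyRange 0 n 1).filter (fun j => PySem.List.pyGetD rmp j 0 != 0)
      = nzPos 0 l := by
    rw [hr]
    exact filt (fun j => PySem.List.pyGetD rmp j 0) l 0 (by
      intro m hm
      have hmr : (m : Int) < (rmp.length : Int) := by
        simp [hl, List.length_take] at hm; omega
      show PySem.List.pyGetD rmp (0 + (m : Int)) 0 = l[m]
      rw [show (0 : Int) + (m : Int) = (m : Int) by ring,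
          PySem.List.pyGetD_eq_getElem rmp 0 (by positivity) hmr]
      simp [hl, List.getElem_take])
  have hcl : (((PySem.List.pyRange 0 n 1).length : Nat) : Int) = 0 + (l.length : Int) := by
    rw [PySem.List.length_pyRange_one]; omega
  rw [hfilt, zipfold, hcl]
  have hb : [(-1 : Int)] ++ nzPos 0 l ++ [0 + (l.length : Int)]
      = (-1 : Int) :: (nzPos 0 l ++ [0 + (l.length : Int)]) := by simp
  rw [hb, gaps_eq_runs]
  simp

-- ===== VERDICT (by name: the statement is the Claim_ definition above) =====
theorem solve_spec : Claim_equal_solve := by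
  unfold Claim_equal_solve
  intro t tcs _ hpre
  obtain ⟨ht1, hcases⟩ := hpre
  unfold Spec_solve solve solve_alt
  rw [foldl_pyRange_take tcs (0, 0, ([] : List Int))
      (fun (acc : List Int) c => acc ++ [caseA c]) [] t ht1]
  rw [foldl_pyRange_take tcs (0, 0, ([] : List Int))
      (fun (acc : List Int) c => acc ++ [caseB c]) [] t ht1]
  rw [PySem.List.foldl_append_singleton_eq_map caseA, PySem.List.foldl_append_singleton_eq_map caseB]
  simp only [List.nil_append]
  exact List.map_congr_left (fun c hc => by
    obtain ⟨hb, hkk⟩ := hcases c hc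
    exact caseA_eq_caseB c hb hkk)
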